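-- pv_equiv track=rewrite | github.com/shivansh023023/Karbon_Assignment | agent_utils.py | guess_column_mapping
-- ===== SOURCE A (Python) =====
-- from typing import Dict, List, Tuple
--
-- def guess_column_mapping(found_cols: List[str], expected_cols: List[str]) -> Dict[str, str]:
--     """Map columns by fuzzy keyword matching.
--
--     Returns mapping: found_col -> expected_col
--     """
--     key_map = {
--         "date": ["date", "txn date", "transaction date"],
--         "description": ["description", "narration", "details"],
--         "debit": ["debit", "withdrawal", "dr", "debit amt"],
--         "credit": ["credit", "deposit", "cr", "credit amt"],
--         "balance": ["balance", "closing balance", "available balance"],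
--     }
--
--     expected_lower = [c.lower() for c in expected_cols]
--     mapping: Dict[str, str] = {}
--
--     for f in found_cols:
--         fl = f.lower().strip()
--         matched_expected: str | None = None
--         for expected in expected_cols:
--             if expected.lower().strip() == fl:
--                 matched_expected = expected
--                 break
--
--         if not matched_expected:
--             # heuristic by keyword
--             for expected_key, keywords in key_map.items():
--                 if any(k in fl for k in keywords):
--                     # find expected column that contains the key
--                     for e in expected_cols:
--                         if expected_key in e.lower():
--                             matched_expected = e
--                             break
--                 if matched_expected:
--                     break
--
--         if matched_expected:
--             mapping[f] = matched_expected
--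
--     return mapping
-- ===== SOURCE B (Python) =====
-- def guess_column_mapping(found_cols, expected_cols):
--     """Rule-table reformulation: compile an ordered rule list once (an exact
--     rule per expected column, then one keyword rule per synonym group that has
--     a containing expected column); each found column then maps to the target
--     of the first rule it satisfies."""
--     key_map = {
--         "date": ["date", "txn date", "transaction date"],
--         "description": ["description", "narration", "details"],
--         "debit": ["debit", "withdrawal", "dr", "debit amt"],
--         "credit": ["credit", "deposit", "cr", "credit amt"],
--         "balance": ["balance", "closing balance", "available balance"],
--     }
--
--     rules = [(True, [e.lower().strip()], e) for e in expected_cols]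
--     for key, kws in key_map.items():
--         target = next((e for e in expected_cols if key in e.lower()), None)
--         if target is not None:
--             rules.append((False, kws, target))
--
--     mapping = {}
--     for f in found_cols:
--         fl = f.lower().strip()
--         target = None
--         for is_exact, tests, tgt in rules:
--             if (fl in tests) if is_exact else any(k in fl for k in tests):
--                 target = tgt
--                 break
--         if target:
--             mapping[f] = target
--     return mapping
-- ===== Notes on version B (the rewrite author's own statement) =====
-- stated objective: alternative
-- what changed: B compiles, in one pass, an ordered rule table (an exact rule per expected column followed by one keyword rule per synonym group that has a containing expected column) and maps each found column via a single first-satisfied-rule scan, replacing A's staged exact-scan-then-keyword-rescan control flow.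
import Mathlib
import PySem

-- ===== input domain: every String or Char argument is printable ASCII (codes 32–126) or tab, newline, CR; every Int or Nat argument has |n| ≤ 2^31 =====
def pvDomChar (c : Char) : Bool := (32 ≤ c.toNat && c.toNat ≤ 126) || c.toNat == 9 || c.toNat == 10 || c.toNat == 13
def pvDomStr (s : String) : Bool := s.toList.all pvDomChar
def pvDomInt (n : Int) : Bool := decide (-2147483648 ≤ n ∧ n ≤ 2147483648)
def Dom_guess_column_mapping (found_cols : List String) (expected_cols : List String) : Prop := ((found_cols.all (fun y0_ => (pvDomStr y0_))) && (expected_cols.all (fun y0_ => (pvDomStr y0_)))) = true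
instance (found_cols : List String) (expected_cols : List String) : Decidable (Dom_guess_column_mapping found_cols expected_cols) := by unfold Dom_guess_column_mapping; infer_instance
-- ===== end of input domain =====

-- B compiles A's staged exact/keyword logic into one ordered rule table built once and maps each
-- found column by its first satisfied rule; equal return value proved (alternative decomposition).

-- ===== PORT A =====

-- the key_map literal of the Python source
def pvKeyMap : List (String × List String) :=
  [("date", ["date", "txn date", "transaction date"]),
   ("description", ["description", "narration", "details"]),
   ("debit", ["debit", "withdrawal", "dr", "debit amt"]),
   ("credit", ["credit", "deposit", "cr", "credit amt"]),
   ("balance", ["balance", "closing balance", "available balance"])]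

-- Python truthiness of the `str | None` variable matched_expected (`if matched_expected:`)
def pvTruthy : Option String → Bool
  | some e => e ≠ ""
  | none => false

-- A's heuristic loop: `for expected_key, keywords in key_map.items(): …`, threading matched_expected
def pvHeurA (es : List String) (fl : String) : List (String × List String) → Option String → Option String
  | [], m => m
  | (k, kws) :: rest, m =>
      let m' := if kws.any (fun kw => PySem.Str.isIn kw fl) then
                  match es.find? (fun e => PySem.Str.isIn k (PySem.Str.lower e)) with
                  | some e => some e          -- `matched_expected = e; break`
                  | none => m
                else m
      if pvTruthy m' then m' else pvHeurA es fl rest m'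

def guess_column_mapping (found_cols : List String) (expected_cols : List String) : List (String × String) :=
  let _expected_lower := expected_cols.map PySem.Str.lower   -- computed but never used in A
  (found_cols.foldl (fun (mapping : PySem.Dict String String) f =>
      let fl := PySem.Str.strip (PySem.Str.lower f)
      let m0 := expected_cols.find? (fun e => PySem.Str.strip (PySem.Str.lower e) == fl)
      let matched := if pvTruthy m0 then m0 else pvHeurA expected_cols fl pvKeyMap m0
      match matched with
      | some m => if m == "" then mapping else mapping.insert f m   -- `if matched_expected: mapping[f] = …`
      | none => mapping) PySem.Dict.empty).items

-- ===== PORT B =====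

-- B's compiled rule table: exact rules for every expected column, then one keyword rule per
-- key_map group whose key is contained in some expected column (`rules.append(...)` on hits)
def pvRules (es : List String) : List (Bool × List String × String) :=
  pvKeyMap.foldl (fun acc p =>
    match es.find? (fun e => PySem.Str.isIn p.1 (PySem.Str.lower e)) with
    | some t => acc ++ [(false, p.2, t)]
    | none => acc)
    (es.map (fun e => (true, [PySem.Str.strip (PySem.Str.lower e)], e)))

-- `if (fl in tests) if is_exact else any(k in fl for k in tests)`
def pvRuleHits (fl : String) (r : Bool × List String × String) : Bool :=
  if r.1 then r.2.1.contains fl else r.2.1.any (fun k => PySem.Str.isIn k fl)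

def guess_column_mapping_alt (found_cols : List String) (expected_cols : List String) : List (String × String) :=
  let rules := pvRules expected_cols
  (found_cols.foldl (fun (mapping : PySem.Dict String String) f =>
      let fl := PySem.Str.strip (PySem.Str.lower f)
      let target := (rules.find? (pvRuleHits fl)).map (fun r => r.2.2)   -- rule loop with break
      match target with
      | some t => if t == "" then mapping else mapping.insert f t        -- `if target: mapping[f] = target`
      | none => mapping) PySem.Dict.empty).items

-- ===== PRECONDITION & SPEC =====
def Spec_guess_column_mapping (found_cols : List String) (expected_cols : List String) (out : List (String × String)) : Prop := out = guess_column_mapping_alt found_cols expected_cols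
instance (found_cols : List String) (expected_cols : List String) (out : List (String × String)) : Decidable (Spec_guess_column_mapping found_cols expected_cols out) := by unfold Spec_guess_column_mapping; infer_instance

-- ===== CLAIM (what is proved, stated in full; the proofs are below) =====
def Claim_equal_guess_column_mapping : Prop := ∀ (found_cols : List String) (expected_cols : List String), Dom_guess_column_mapping found_cols expected_cols → Spec_guess_column_mapping found_cols expected_cols (guess_column_mapping found_cols expected_cols)

-- ===== LEMMAS AND PROOFS =====

-- the keyword-rule part of the table, as a filterMap (foldl-with-append unfolded)
def pvKwRules (es : List String) : List (Bool × List String × String) :=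
  pvKeyMap.filterMap (fun p =>
    (es.find? (fun e => PySem.Str.isIn p.1 (PySem.Str.lower e))).map (fun t => (false, p.2, t)))

theorem pvRules_foldl (es : List String) (km : List (String × List String))
    (acc : List (Bool × List String × String)) :
    km.foldl (fun acc p =>
      match es.find? (fun e => PySem.Str.isIn p.1 (PySem.Str.lower e)) with
      | some t => acc ++ [(false, p.2, t)]
      | none => acc) acc
    = acc ++ km.filterMap (fun p =>
        (es.find? (fun e => PySem.Str.isIn p.1 (PySem.Str.lower e))).map (fun t => (false, p.2, t))) := by
  induction km generalizing acc with
  | nil => simp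
  | cons p rest ih =>
    cases hf : es.find? (fun e => PySem.Str.isIn p.1 (PySem.Str.lower e)) with
    | none =>
      simp only [List.foldl_cons, List.filterMap_cons, hf, Option.map_none]
      exact ih acc
    | some t =>
      simp only [List.foldl_cons, List.filterMap_cons, hf, Option.map_some]
      rw [ih]
      simp

theorem pvRules_eq (es : List String) :
    pvRules es = es.map (fun e => (true, [PySem.Str.strip (PySem.Str.lower e)], e)) ++ pvKwRules es := by
  rw [pvRules, pvRules_foldl]; rfl

-- a nonempty substring of a string forces the string nonempty
theorem pvIsIn_ne_empty (k e : String) (hk : k ≠ "") (h : PySem.Str.isIn k (PySem.Str.lower e) = true) : e ≠ "" := by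
  intro he0
  subst he0
  have h2 := (PySem.Str.isIn_iff_infix k (PySem.Str.lower "")).mp h
  have h3 : (PySem.Str.lower "").toList = [] := rfl
  rw [h3] at h2
  have h4 : k.toList = [] := List.eq_nil_of_infix_nil h2
  exact hk (by rw [← String.ofList_toList (s := k), h4])

-- A's heuristic loop started falsy computes exactly B's first matching keyword rule
theorem pvHeur_kw (es : List String) (fl : String) (km : List (String × List String))
    (hk : ∀ p ∈ km, p.1 ≠ "") :
    pvHeurA es fl km none
      = ((km.filterMap (fun p =>
            (es.find? (fun e => PySem.Str.isIn p.1 (PySem.Str.lower e))).map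
              (fun t => (false, p.2, t)))).find? (pvRuleHits fl)).map (fun r => r.2.2) := by
  induction km with
  | nil => simp [pvHeurA]
  | cons p rest ih =>
    obtain ⟨k, kws⟩ := p
    have hk1 : k ≠ "" := hk (k, kws) (by simp)
    have hkrest : ∀ q ∈ rest, q.1 ≠ "" := fun q hq => hk q (by simp [hq])
    rw [List.filterMap_cons, pvHeurA]
    cases hf : es.find? (fun e => PySem.Str.isIn k (PySem.Str.lower e)) with
    | none =>
      cases ha : kws.any (fun kw => PySem.Str.isIn kw fl) <;>
        simpa [ha, pvTruthy] using ih hkrest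
    | some t =>
      have hp : (fun e => PySem.Str.isIn k (PySem.Str.lower e)) t = true :=
        List.find?_some (p := fun e => PySem.Str.isIn k (PySem.Str.lower e)) hf
      have ht : t ≠ "" := pvIsIn_ne_empty k t hk1 hp
      simp only [Option.map_some]
      cases ha : kws.any (fun kw => PySem.Str.isIn kw fl) with
      | false =>
        simp only [PySem.Str.isIn_eq] at ha
        rw [List.find?_cons_of_neg (by simp [pvRuleHits]; simpa using ha)]
        simpa [ha, pvTruthy] using ih hkrest
      | true =>
        simp only [PySem.Str.isIn_eq] at ha
        rw [List.find?_cons_of_pos (by simp [pvRuleHits]; simpa using ha)]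
        simp [pvTruthy, ht]

-- no nonempty keyword is contained in the empty normalized name, so the loop leaves m untouched
theorem pvHeur_empty (es : List String) (km : List (String × List String)) (m : Option String)
    (hk : ∀ p ∈ km, ∀ kw ∈ p.2, kw ≠ "") (hm : pvTruthy m = false) :
    pvHeurA es "" km m = m := by
  induction km with
  | nil => simp [pvHeurA]
  | cons p rest ih =>
    obtain ⟨k, kws⟩ := p
    have ha : kws.any (fun kw => PySem.Str.isIn kw "") = false := by
      simp only [List.any_eq_false]
      intro kw hkw
      have hne : kw ≠ "" := hk (k, kws) (by simp) kw hkw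
      intro hin
      have h2 := (PySem.Str.isIn_iff_infix kw "").mp hin
      have h3 : ("" : String).toList = [] := rfl
      rw [h3] at h2
      exact hne (by rw [← String.ofList_toList (s := kw), List.eq_nil_of_infix_nil h2])
    rw [pvHeurA]
    simp only [ha, Bool.false_eq_true, if_false, hm]
    exact ih (fun q hq => hk q (by simp [hq]))

-- ===== VERDICT (by name: the statement is the Claim_ definition above) =====
theorem guess_column_mapping_spec : Claim_equal_guess_column_mapping := by
  intro found_cols expected_cols _
  unfold Spec_guess_column_mapping guess_column_mapping guess_column_mapping_alt
  congr 1
  congr 1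
  funext mapping f
  simp only [pvRules_eq, List.find?_append, List.find?_map]
  have hcomp : ((pvRuleHits (PySem.Str.strip (PySem.Str.lower f))) ∘
      (fun e => (true, [PySem.Str.strip (PySem.Str.lower e)], e)))
      = fun e => PySem.Str.strip (PySem.Str.lower e) == PySem.Str.strip (PySem.Str.lower f) := by
    funext e
    simp [pvRuleHits]
    cases h : PySem.Str.strip (PySem.Str.lower e) == PySem.Str.strip (PySem.Str.lower f) with
    | true =>
      have h' : PySem.Str.strip (PySem.Str.lower e) = PySem.Str.strip (PySem.Str.lower f) := by
        simpa using h
      simp [h']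
    | false =>
      have h' : ¬ PySem.Str.strip (PySem.Str.lower e) = PySem.Str.strip (PySem.Str.lower f) := by
        simpa using h
      simp only [decide_eq_false_iff_not]
      exact fun hh => h' hh.symm
  rw [hcomp]
  cases hm0 : expected_cols.find? (fun e => PySem.Str.strip (PySem.Str.lower e) == PySem.Str.strip (PySem.Str.lower f)) with
  | some e =>
    by_cases he : e = ""
    · subst he
      have hfl : PySem.Str.strip (PySem.Str.lower f) = "" := by
        have h := List.find?_some hm0
        simp only [beq_iff_eq] at h
        exact h.symm
      rw [hfl, pvHeur_empty expected_cols pvKeyMap (some "") (by decide) (by rfl)]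
      simp [pvTruthy]
    · simp [pvTruthy, he]
  | none =>
    rw [pvHeur_kw expected_cols (PySem.Str.strip (PySem.Str.lower f)) pvKeyMap (by decide)]
    simp [pvTruthy, pvKwRules]
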